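-- pv_equiv track=rewrite | github.com/nrgforge/plexus | scratch/spike-vocab-priming/spike-phase2-relationships.py | find_entities_in_span
-- ===== SOURCE A (Python) =====
-- KNOWN_ENTITIES = [
--     "provenance", "epistemology", "chain", "mark", "fragment",
--     "tagconceptbridger", "hebbian contribution", "adapter",
--     "enrichment", "multi-phase processing", "concept", "tag",
--     "tagged_with", "references", "contribution", "sink",
--     "enginesink", "fragmentadapter", "provenanceadapter",
--     "plexus", "graph", "pipeline", "ingest",
--     "dimension", "node", "edge",
--     # Compound forms that appear in text
--     "chain node", "mark node", "fragment node", "concept node",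
--     "provenance dimension", "semantic dimension", "structure dimension",
--     "provenance trail", "provenance mark",
--     "cross-dimensional", "deterministic id",
-- ]
--
-- def normalize(text):
--     return text.lower().strip()
--
-- def find_entities_in_span(span_text):
--     """Find known entities mentioned in a text span."""
--     text_lower = normalize(span_text)
--     found = []
--     # Check longer entities first to avoid substring matches
--     sorted_entities = sorted(KNOWN_ENTITIES, key=len, reverse=True)
--     for ent in sorted_entities:
--         if normalize(ent) in text_lower:
--             # Avoid double-counting (e.g., "chain" inside "chain node")
--             already_covered = False
--             for f in found:
--                 if normalize(ent) in normalize(f) or normalize(f) in normalize(ent):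
--                     if len(f) > len(ent):
--                         already_covered = True
--                         break
--             if not already_covered:
--                 found.append(ent)
--     return found
-- ===== SOURCE B (Python) =====
-- KNOWN_ENTITIES = [
--     "provenance", "epistemology", "chain", "mark", "fragment",
--     "tagconceptbridger", "hebbian contribution", "adapter",
--     "enrichment", "multi-phase processing", "concept", "tag",
--     "tagged_with", "references", "contribution", "sink",
--     "enginesink", "fragmentadapter", "provenanceadapter",
--     "plexus", "graph", "pipeline", "ingest",
--     "dimension", "node", "edge",
--     "chain node", "mark node", "fragment node", "concept node",
--     "provenance dimension", "semantic dimension", "structure dimension",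
--     "provenance trail", "provenance mark",
--     "cross-dimensional", "deterministic id",
-- ]
--
--
-- def find_entities_in_span(span_text):
--     """Find known entities mentioned in a text span (two-pass formulation)."""
--     text_lower = span_text.lower().strip()
--     # Pass 1: every entity that occurs in the text, longest first (stable).
--     matches = [e for e in sorted(KNOWN_ENTITIES, key=len, reverse=True)
--                if e.lower().strip() in text_lower]
--     # Pass 2: drop an entity when a strictly longer match contains it.
--     return [e for e in matches
--             if not any(len(o) > len(e) and e in o for o in matches)]
-- ===== Notes on version B (the rewrite author's own statement) =====
-- stated objective: alternative
-- what changed: Replaces A's single loop whose inner suppression check scans the growing accumulator with two independent passes: first collect all matching entities, then filter each against the full match list (strictly longer match containing it); equal by transitivity of substring containment.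
import Mathlib
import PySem

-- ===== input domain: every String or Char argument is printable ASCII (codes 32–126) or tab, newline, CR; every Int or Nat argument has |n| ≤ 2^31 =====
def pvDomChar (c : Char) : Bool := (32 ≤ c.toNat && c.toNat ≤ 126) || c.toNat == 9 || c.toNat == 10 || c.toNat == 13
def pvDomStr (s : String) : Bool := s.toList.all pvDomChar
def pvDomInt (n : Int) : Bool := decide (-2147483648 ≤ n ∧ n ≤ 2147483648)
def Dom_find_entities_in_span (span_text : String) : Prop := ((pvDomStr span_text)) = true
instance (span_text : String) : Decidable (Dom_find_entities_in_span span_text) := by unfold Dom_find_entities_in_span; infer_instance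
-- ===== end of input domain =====

-- B replaces A's single loop (whose suppression check scans the growing accumulator) by two
-- independent passes: collect all matches, then filter each against the full match list ("alternative").

-- ===== PORT A =====
def KNOWN_ENTITIES : List String := [
    "provenance", "epistemology", "chain", "mark", "fragment",
    "tagconceptbridger", "hebbian contribution", "adapter",
    "enrichment", "multi-phase processing", "concept", "tag",
    "tagged_with", "references", "contribution", "sink",
    "enginesink", "fragmentadapter", "provenanceadapter",
    "plexus", "graph", "pipeline", "ingest",
    "dimension", "node", "edge",
    "chain node", "mark node", "fragment node", "concept node",
    "provenance dimension", "semantic dimension", "structure dimension",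
    "provenance trail", "provenance mark",
    "cross-dimensional", "deterministic id"]

def pvNormalize (text : String) : String := PySem.Str.strip (PySem.Str.lower text)

def find_entities_in_span (span_text : String) : List String :=
  let text_lower := pvNormalize span_text
  let sorted_entities := PySem.List.sorted KNOWN_ENTITIES (fun e => PySem.Str.len e) true
  sorted_entities.foldl (fun found ent =>
    if PySem.Str.isIn (pvNormalize ent) text_lower then
      -- inner loop with break: 'any f in found' with the same condition
      let already_covered := found.any (fun f =>
        (PySem.Str.isIn (pvNormalize ent) (pvNormalize f) ||
         PySem.Str.isIn (pvNormalize f) (pvNormalize ent)) &&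
        decide (PySem.Str.len ent < PySem.Str.len f))
      if already_covered then found else found ++ [ent]
    else found) []

-- ===== PORT B =====
def find_entities_in_span_alt (span_text : String) : List String :=
  let text_lower := pvNormalize span_text
  let ms := (PySem.List.sorted KNOWN_ENTITIES (fun e => PySem.Str.len e) true).filter
    (fun e => PySem.Str.isIn (pvNormalize e) text_lower)
  ms.filter (fun e =>
    ! ms.any (fun o => decide (PySem.Str.len e < PySem.Str.len o) && PySem.Str.isIn e o))

-- ===== PRECONDITION & SPEC =====
def Spec_find_entities_in_span (span_text : String) (out : List String) : Prop := out = find_entities_in_span_alt span_text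
instance (span_text : String) (out : List String) : Decidable (Spec_find_entities_in_span span_text out) := by unfold Spec_find_entities_in_span; infer_instance

-- ===== CLAIM (what is proved, stated in full; the proofs are below) =====
def Claim_equal_find_entities_in_span : Prop := ∀ (span_text : String), Dom_find_entities_in_span span_text → Spec_find_entities_in_span span_text (find_entities_in_span span_text)

-- ===== LEMMAS AND PROOFS =====

theorem pv_len_le_of_isIn {a b : String} (h : PySem.Str.isIn a b = true) :
    PySem.Str.len a ≤ PySem.Str.len b := by
  have := ((PySem.Str.isIn_iff_infix a b).mp h).length_le
  simp only [PySem.Str.len_eq]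
  exact_mod_cast this

theorem pv_isIn_trans {a b c : String} (h1 : PySem.Str.isIn a b = true)
    (h2 : PySem.Str.isIn b c = true) : PySem.Str.isIn a c = true :=
  (PySem.Str.isIn_iff_infix a c).mpr
    (((PySem.Str.isIn_iff_infix a b).mp h1).trans ((PySem.Str.isIn_iff_infix b c).mp h2))

-- the second-pass filter predicate of B, against a fixed match list M
def pvKeep (M : List String) (e : String) : Bool :=
  ! M.any (fun o => decide (PySem.Str.len e < PySem.Str.len o) && PySem.Str.isIn e o)

-- crux: A's accumulator check at ent equals the complement of B's whole-list check
theorem pv_covered_eq (p : String → Bool) (S pre rest : List String) (ent : String)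
    (hS : S = pre ++ ent :: rest)
    (hsort : S.Pairwise (fun a b => PySem.Str.len b ≤ PySem.Str.len a))
    (hnorm : ∀ e ∈ S, pvNormalize e = e)
    (hp : p ent = true) :
    ((pre.filter p).filter (pvKeep (S.filter p))).any (fun f =>
        (PySem.Str.isIn (pvNormalize ent) (pvNormalize f) ||
         PySem.Str.isIn (pvNormalize f) (pvNormalize ent)) &&
        decide (PySem.Str.len ent < PySem.Str.len f))
      = ! pvKeep (S.filter p) ent := by
  have hent : pvNormalize ent = ent := hnorm ent (by simp [hS])
  have fwd : ((pre.filter p).filter (pvKeep (S.filter p))).any (fun f =>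
        (PySem.Str.isIn (pvNormalize ent) (pvNormalize f) ||
         PySem.Str.isIn (pvNormalize f) (pvNormalize ent)) &&
        decide (PySem.Str.len ent < PySem.Str.len f)) = true →
      pvKeep (S.filter p) ent = false := by
    intro h
    rw [List.any_eq_true] at h
    obtain ⟨f, hfmem, hcond⟩ := h
    have hfpre : f ∈ pre.filter p := (List.mem_filter.mp hfmem).1
    have hfp : p f = true := (List.mem_filter.mp hfpre).2
    have hfS : f ∈ S := by
      rw [hS]; exact List.mem_append_left _ (List.mem_filter.mp hfpre).1
    have hfn : pvNormalize f = f := hnorm f hfS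
    rw [hent, hfn, Bool.and_eq_true, Bool.or_eq_true, decide_eq_true_iff] at hcond
    obtain ⟨hor, hlt⟩ := hcond
    have hin : PySem.Str.isIn ent f = true := by
      rcases hor with h1 | h1
      · exact h1
      · exact absurd (pv_len_le_of_isIn h1) (by omega)
    have hfM : f ∈ S.filter p := List.mem_filter.mpr ⟨hfS, hfp⟩
    unfold pvKeep
    rw [Bool.not_eq_false', List.any_eq_true]
    exact ⟨f, hfM, by rw [Bool.and_eq_true, decide_eq_true_iff]; exact ⟨hlt, hin⟩⟩
  have bwd : pvKeep (S.filter p) ent = false →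
      ((pre.filter p).filter (pvKeep (S.filter p))).any (fun f =>
        (PySem.Str.isIn (pvNormalize ent) (pvNormalize f) ||
         PySem.Str.isIn (pvNormalize f) (pvNormalize ent)) &&
        decide (PySem.Str.len ent < PySem.Str.len f)) = true := by
    intro h
    unfold pvKeep at h
    rw [Bool.not_eq_false', List.any_eq_true] at h
    obtain ⟨o, hoM, hcond⟩ := h
    rw [Bool.and_eq_true, decide_eq_true_iff] at hcond
    -- candidates: strictly longer matches containing ent; pick one of maximal length
    set C := (S.filter p).filter
        (fun o => decide (PySem.Str.len ent < PySem.Str.len o) && PySem.Str.isIn ent o) with hCdef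
    have hoC : o ∈ C := by
      rw [hCdef, List.mem_filter]
      exact ⟨hoM, by rw [Bool.and_eq_true, decide_eq_true_iff]; exact hcond⟩
    obtain ⟨m, hm⟩ : ∃ m, m ∈ C.argmax PySem.Str.len := by
      cases hma : C.argmax PySem.Str.len with
      | none => exact absurd (List.argmax_eq_none.mp hma ▸ hoC) (List.not_mem_nil)
      | some m => exact ⟨m, by rw [Option.mem_def]⟩
    have hmC : m ∈ C := List.argmax_mem hm
    have hmprops := List.mem_filter.mp (hCdef ▸ hmC)
    have hmM : m ∈ S.filter p := hmprops.1
    have hmlen : PySem.Str.len ent < PySem.Str.len m ∧ PySem.Str.isIn ent m = true := by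
      have := hmprops.2
      rw [Bool.and_eq_true, decide_eq_true_iff] at this
      exact this
    have hkm : pvKeep (S.filter p) m = true := by
      by_contra hkm
      rw [Bool.not_eq_true] at hkm
      unfold pvKeep at hkm
      rw [Bool.not_eq_false', List.any_eq_true] at hkm
      obtain ⟨o', ho'M, hc'⟩ := hkm
      rw [Bool.and_eq_true, decide_eq_true_iff] at hc'
      have ho'C : o' ∈ C := by
        rw [hCdef, List.mem_filter]
        refine ⟨ho'M, ?_⟩
        rw [Bool.and_eq_true, decide_eq_true_iff]
        exact ⟨by omega, pv_isIn_trans hmlen.2 hc'.2⟩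
      have := List.le_of_mem_argmax ho'C hm
      omega
    have hmS : m ∈ S := (List.mem_filter.mp hmM).1
    have hmpre : m ∈ pre := by
      rw [hS] at hmS
      rcases List.mem_append.mp hmS with h1 | h1
      · exact h1
      · rcases List.mem_cons.mp h1 with h2 | h2
        · subst h2; omega
        · -- m after ent in S: its length is ≤ len ent, contradiction
          rw [hS, List.pairwise_append] at hsort
          have := (List.pairwise_cons.mp hsort.2.1).1 m h2
          omega
    have hmacc : m ∈ (pre.filter p).filter (pvKeep (S.filter p)) :=
      List.mem_filter.mpr ⟨List.mem_filter.mpr ⟨hmpre, (List.mem_filter.mp hmM).2⟩, hkm⟩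
    rw [List.any_eq_true]
    refine ⟨m, hmacc, ?_⟩
    rw [hent, hnorm m hmS, Bool.and_eq_true, Bool.or_eq_true, decide_eq_true_iff]
    exact ⟨Or.inl hmlen.2, hmlen.1⟩
  cases hk : pvKeep (S.filter p) ent with
  | false => simpa [hk] using bwd hk
  | true =>
    simp only [Bool.not_true]
    cases hcov : ((pre.filter p).filter (pvKeep (S.filter p))).any (fun f =>
        (PySem.Str.isIn (pvNormalize ent) (pvNormalize f) ||
         PySem.Str.isIn (pvNormalize f) (pvNormalize ent)) &&
        decide (PySem.Str.len ent < PySem.Str.len f)) with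
    | false => rfl
    | true => rw [fwd hcov] at hk; exact hk.symm ▸ rfl

-- the loop of A, started from the already-decided prefix, lands on B's two-pass result
theorem pv_loop (p : String → Bool) (S : List String)
    (hsort : S.Pairwise (fun a b => PySem.Str.len b ≤ PySem.Str.len a))
    (hnorm : ∀ e ∈ S, pvNormalize e = e) :
    ∀ (suf pre : List String), pre ++ suf = S →
      suf.foldl (fun found ent =>
        if p ent then
          let already_covered := found.any (fun f =>
            (PySem.Str.isIn (pvNormalize ent) (pvNormalize f) ||
             PySem.Str.isIn (pvNormalize f) (pvNormalize ent)) &&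
            decide (PySem.Str.len ent < PySem.Str.len f))
          if already_covered then found else found ++ [ent]
        else found)
        ((pre.filter p).filter (pvKeep (S.filter p)))
      = (S.filter p).filter (pvKeep (S.filter p)) := by
  intro suf
  induction suf with
  | nil =>
    intro pre hpre
    rw [List.foldl_nil, List.append_nil] at *
    rw [hpre]
  | cons ent rest ih =>
    intro pre hpre
    rw [List.foldl_cons]
    have hstep : (if p ent then
          let already_covered := ((pre.filter p).filter (pvKeep (S.filter p))).any (fun f =>
            (PySem.Str.isIn (pvNormalize ent) (pvNormalize f) ||
             PySem.Str.isIn (pvNormalize f) (pvNormalize ent)) &&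
            decide (PySem.Str.len ent < PySem.Str.len f))
          if already_covered then ((pre.filter p).filter (pvKeep (S.filter p)))
          else ((pre.filter p).filter (pvKeep (S.filter p))) ++ [ent]
        else ((pre.filter p).filter (pvKeep (S.filter p))))
        = ((pre ++ [ent]).filter p).filter (pvKeep (S.filter p)) := by
      cases hp : p ent with
      | false => simp [hp]
      | true =>
        simp only [if_true]
        rw [pv_covered_eq p S pre rest ent hpre.symm hsort hnorm hp]
        cases hk : pvKeep (S.filter p) ent with
        | false => simp [hk]
        | true => simp [hk, hp]
    rw [hstep]
    exact ih (pre ++ [ent]) (by rw [List.append_assoc]; exact hpre)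

-- every known entity is already normalized (lowercase, stripped)
theorem pv_entities_normalized : ∀ e ∈ KNOWN_ENTITIES, pvNormalize e = e := by decide

-- ===== VERDICT (by name: the statement is the Claim_ definition above) =====
theorem find_entities_in_span_spec : Claim_equal_find_entities_in_span := by
  intro s _
  show find_entities_in_span s = find_entities_in_span_alt s
  have hsort := PySem.List.sorted_pairwise_rev KNOWN_ENTITIES (fun e => PySem.Str.len e)
  have hnorm : ∀ e ∈ PySem.List.sorted KNOWN_ENTITIES (fun e => PySem.Str.len e) true,
      pvNormalize e = e := by
    intro e he
    exact pv_entities_normalized e ((PySem.List.mem_sorted _ _ _ _).mp he)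
  have h := pv_loop (fun e => PySem.Str.isIn (pvNormalize e) (pvNormalize s))
      (PySem.List.sorted KNOWN_ENTITIES (fun e => PySem.Str.len e) true) hsort hnorm
      (PySem.List.sorted KNOWN_ENTITIES (fun e => PySem.Str.len e) true) [] rfl
  simpa [find_entities_in_span, find_entities_in_span_alt, pvKeep] using h
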